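-- pv_equiv track=rewrite | github.com/lili-chen/ising-optimization-rbm | old_files/efficiency_and_problem_size.py | state_to_int
-- ===== SOURCE A (Python) =====
-- def state_to_int(s):
--     binary = [0 if i == -1 else 1 for i in s]
--     result = 0
--     power_of_two = 1
--     for bit in reversed(binary):
--         result += power_of_two * bit
--         power_of_two *= 2
--     return result
-- ===== SOURCE B (Python) =====
-- def state_to_int(s):
--     result = 0
--     for i in s:
--         result = result * 2 + (0 if i == -1 else 1)
--     return result
-- ===== Notes on version B (the rewrite author's own statement) =====
-- stated objective: simpler
-- what changed: Replaces the intermediate binary list and the reversed loop with a growing power-of-two multiplier by a single forward Horner shift-and-add accumulator.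
import Mathlib
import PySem

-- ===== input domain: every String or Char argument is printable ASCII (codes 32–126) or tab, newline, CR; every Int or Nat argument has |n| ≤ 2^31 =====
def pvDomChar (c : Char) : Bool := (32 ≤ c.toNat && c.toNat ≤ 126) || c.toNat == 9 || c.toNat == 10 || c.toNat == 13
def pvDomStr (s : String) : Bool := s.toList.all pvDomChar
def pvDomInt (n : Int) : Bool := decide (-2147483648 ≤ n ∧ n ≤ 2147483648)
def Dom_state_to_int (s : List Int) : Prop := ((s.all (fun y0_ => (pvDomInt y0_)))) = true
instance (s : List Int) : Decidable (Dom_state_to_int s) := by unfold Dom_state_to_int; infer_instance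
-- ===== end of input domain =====

-- B replaces A's binary list + reversed loop with a forward Horner accumulator (objective: simpler).

-- ===== PORT A =====
def state_to_int (s : List Int) : Int :=
  let binary := s.map (fun i => if i = -1 then (0 : Int) else 1)
  let rp := (binary.reverse).foldl
    (fun (rp : Int × Int) bit => (rp.1 + rp.2 * bit, rp.2 * 2)) (0, 1)
  rp.1

-- ===== PORT B =====
def state_to_int_alt (s : List Int) : Int :=
  s.foldl (fun result i => result * 2 + (if i = -1 then 0 else 1)) 0

-- ===== PRECONDITION & SPEC =====
def Spec_state_to_int (s : List Int) (out : Int) : Prop := out = state_to_int_alt s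
instance (s : List Int) (out : Int) : Decidable (Spec_state_to_int s out) := by unfold Spec_state_to_int; infer_instance

-- ===== CLAIM (what is proved, stated in full; the proofs are below) =====
def Claim_equal_state_to_int : Prop := ∀ (s : List Int), Dom_state_to_int s → Spec_state_to_int s (state_to_int s)

-- ===== LEMMAS AND PROOFS =====

-- value of a bit list read little-endian (head = least significant)
def pvV : List Int → Int
  | [] => 0
  | b :: t => b + 2 * pvV t

theorem pvA_foldl (M : List Int) : ∀ (r p : Int),
    M.foldl (fun (rp : Int × Int) bit => (rp.1 + rp.2 * bit, rp.2 * 2)) (r, p)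
      = (r + p * pvV M, p * 2 ^ M.length) := by
  induction M with
  | nil => intro r p; simp [pvV]
  | cons b t ih =>
      intro r p
      simp only [List.foldl_cons, ih, pvV, List.length_cons]
      refine Prod.ext ?_ ?_ <;> simp <;> ring

theorem pvV_append_single (M : List Int) (c : Int) :
    pvV (M ++ [c]) = pvV M + 2 ^ M.length * c := by
  induction M with
  | nil => simp [pvV]
  | cons b t ih => simp [pvV, ih]; ring

theorem pvB_foldl (s : List Int) : ∀ (r : Int),
    s.foldl (fun result i => result * 2 + (if i = -1 then 0 else 1)) r
      = r * 2 ^ s.length + pvV ((s.map (fun i => if i = -1 then (0 : Int) else 1)).reverse) := by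
  induction s with
  | nil => intro r; simp [pvV]
  | cons a t ih =>
      intro r
      simp only [List.foldl_cons, ih, List.map_cons, List.reverse_cons, pvV_append_single,
        List.length_reverse, List.length_map, List.length_cons]
      ring

-- ===== VERDICT (by name: the statement is the Claim_ definition above) =====
theorem state_to_int_spec : Claim_equal_state_to_int := by
  intro s _
  unfold Spec_state_to_int state_to_int state_to_int_alt
  simp only [pvA_foldl, pvB_foldl]
  ring
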